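-- pv_equiv track=rewrite | github.com/Fiap-pedro/Computational-Thinking | selection_sort/teste1.py | i_v_menores
-- ===== SOURCE A (Python) =====
-- select = [68, 95, 41, 12, 64, 71]
--
-- def i_v_menores(index, lista):
--     menor = select[index]
--     indice = index
--     for i in range(index+1, len(select)):
--         if menor > select[i]:
--             menor = select[i]
--             indice = i
--     return indice, menor
-- ===== SOURCE B (Python) =====
-- select = [68, 95, 41, 12, 64, 71]
--
-- def i_v_menores(index, lista):
--     sub = select[index:]
--
--     def earliest_min(xs):
--         # recursion on the list structure: earliest minimum of xs as (offset, value)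
--         if len(xs) == 1:
--             return 0, xs[0]
--         j, m = earliest_min(xs[1:])
--         if xs[0] <= m:
--             return 0, xs[0]
--         return j + 1, m
--
--     k, menor = earliest_min(sub)
--     return index + k, menor
-- ===== Notes on version B (the rewrite author's own statement) =====
-- stated objective: alternative
-- what changed: Replaces A's iterative forward tracking loop over the global list with a structural recursion from the right on the suffix select[index:], combining each head with the earliest minimum of the tail (tie goes to the head, preserving first-occurrence semantics).
-- intended difference: For index in {-2,-1}, A wraps the negative index for its start element but then rescans the whole list from position index+1 and returns (3, 12), the global minimum, while B returns the minimum of the suffix select[index:] ((-1, 71) resp. (-2, 64)), which is the intended suffix-minimum reading of a negative index. — e.g. on i_v_menores(-1, []): A returns (3, 12), B returns (-1, 71)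
import Mathlib
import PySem

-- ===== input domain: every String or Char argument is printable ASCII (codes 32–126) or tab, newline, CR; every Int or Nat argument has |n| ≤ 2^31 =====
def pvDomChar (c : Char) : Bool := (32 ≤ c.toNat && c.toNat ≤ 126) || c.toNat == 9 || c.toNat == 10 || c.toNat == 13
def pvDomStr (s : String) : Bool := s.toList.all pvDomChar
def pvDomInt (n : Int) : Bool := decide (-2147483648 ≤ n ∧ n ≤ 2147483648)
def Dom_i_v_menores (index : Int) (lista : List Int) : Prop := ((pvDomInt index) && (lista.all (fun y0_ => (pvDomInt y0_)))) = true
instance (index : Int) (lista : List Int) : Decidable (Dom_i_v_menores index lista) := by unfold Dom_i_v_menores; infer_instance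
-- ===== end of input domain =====

-- B replaces A's iterative forward tracking loop with a structural recursion from the
-- right on the suffix select[index:]; 'lista' is ignored by both, exactly as in Python.

-- the module-level global 'select' both Pythons read
def pvSelect : List Int := [68, 95, 41, 12, 64, 71]

-- ===== PORT A =====
def i_v_menores (index : Int) (lista : List Int) : Int × Int :=
  let menor := PySem.List.pyGetD pvSelect index 0
  (PySem.List.pyRange (index + 1) (pvSelect.length : Int) 1).foldl
    (fun (st : Int × Int) i =>
      if st.2 > PySem.List.pyGetD pvSelect i 0 then (i, PySem.List.pyGetD pvSelect i 0) else st)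
    (index, menor)

-- ===== PORT B =====
-- earliest_min from Source B: recursion on the list structure; (0, 0) stands for the
-- empty case, which Python never returns from (it raises) and Pre_ excludes.
def pvEarliestMin : List Int → Int × Int
  | [] => (0, 0)
  | [x] => (0, x)
  | x :: rest =>
      let jm := pvEarliestMin rest
      if x ≤ jm.2 then (0, x) else (jm.1 + 1, jm.2)

def i_v_menores_alt (index : Int) (lista : List Int) : Int × Int :=
  let sub := PySem.List.slice pvSelect (some index) none
  let km := pvEarliestMin sub
  (index + km.1, km.2)

-- ===== PRECONDITION & SPEC =====
-- Pre_ excludes exactly the inputs where A raises IndexError (select has length 6).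
def Pre_i_v_menores (index : Int) (lista : List Int) : Prop := -6 ≤ index ∧ index < 6
instance (index : Int) (lista : List Int) : Decidable (Pre_i_v_menores index lista) := by unfold Pre_i_v_menores; infer_instance
def pvWitness_i_v_menores : Int × List Int := (0, [])

-- For index in {-2,-1}, A wraps the negative index for its start element but then rescans
-- the whole list from position index+1 and returns (3, 12), the global minimum, while B
-- returns the minimum of the suffix select[index:], the intended suffix-minimum reading
-- of a negative index.
def D_i_v_menores (index : Int) (lista : List Int) : Prop := -2 ≤ index ∧ index < 0
instance (index : Int) (lista : List Int) : Decidable (D_i_v_menores index lista) := by unfold D_i_v_menores; infer_instance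

def Spec_i_v_menores (index : Int) (lista : List Int) (out : Int × Int) : Prop := ¬ D_i_v_menores index lista → out = i_v_menores_alt index lista
instance (index : Int) (lista : List Int) (out : Int × Int) : Decidable (Spec_i_v_menores index lista out) := by unfold Spec_i_v_menores; infer_instance

def pvDiffWitness_i_v_menores : Int × List Int := (-1, [])
def pvDiffWitnessOut_i_v_menores : (Int × Int) × (Int × Int) := ((3, 12), (-1, 71))

-- ===== CLAIM (what is proved, stated in full; the proofs are below) =====
def Claim_unchanged_i_v_menores : Prop := ∀ (index : Int) (lista : List Int), Dom_i_v_menores index lista → Pre_i_v_menores index lista → Spec_i_v_menores index lista (i_v_menores index lista)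
def Claim_changed_i_v_menores : Prop := Dom_i_v_menores (pvDiffWitness_i_v_menores.1) (pvDiffWitness_i_v_menores.2) ∧ Pre_i_v_menores (pvDiffWitness_i_v_menores.1) (pvDiffWitness_i_v_menores.2) ∧ D_i_v_menores (pvDiffWitness_i_v_menores.1) (pvDiffWitness_i_v_menores.2) ∧ i_v_menores (pvDiffWitness_i_v_menores.1) (pvDiffWitness_i_v_menores.2) = pvDiffWitnessOut_i_v_menores.1 ∧ i_v_menores_alt (pvDiffWitness_i_v_menores.1) (pvDiffWitness_i_v_menores.2) = pvDiffWitnessOut_i_v_menores.2 ∧ pvDiffWitnessOut_i_v_menores.1 ≠ pvDiffWitnessOut_i_v_menores.2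
def Claim_exact_i_v_menores : Prop := ∀ (index : Int) (lista : List Int), Dom_i_v_menores index lista → Pre_i_v_menores index lista → D_i_v_menores index lista → i_v_menores index lista ≠ i_v_menores_alt index lista

-- ===== LEMMAS AND PROOFS =====
-- both ports ignore 'lista', so they agree with their 'lista := []' instances definitionally
theorem i_v_menores_lista_irrel (index : Int) (lista : List Int) :
    i_v_menores index lista = i_v_menores index [] := rfl

theorem i_v_menores_alt_lista_irrel (index : Int) (lista : List Int) :
    i_v_menores_alt index lista = i_v_menores_alt index [] := rfl

-- ===== VERDICT (by name: the statement is the Claim_ definition above) =====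
theorem i_v_menores_spec : Claim_unchanged_i_v_menores := by
  intro index lista _ hpre
  unfold Spec_i_v_menores
  intro hnd
  unfold Pre_i_v_menores at hpre
  unfold D_i_v_menores at hnd
  rw [i_v_menores_lista_irrel, i_v_menores_alt_lista_irrel]
  obtain ⟨h1, h2⟩ := hpre
  interval_cases index <;> first | (exfalso; omega) | decide

theorem i_v_menores_changed : Claim_changed_i_v_menores := by unfold Claim_changed_i_v_menores; decide

theorem i_v_menores_tight : Claim_exact_i_v_menores := by
  intro index lista _ _ hd
  unfold D_i_v_menores at hd
  rw [i_v_menores_lista_irrel, i_v_menores_alt_lista_irrel]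
  obtain ⟨h1, h2⟩ := hd
  interval_cases index <;> decide
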